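-- pv_equiv track=rewrite | github.com/plai-group/machine_learning_helpers | job_submitter_old.py | make_hyper_string_from_dict
-- ===== SOURCE A (Python) =====
-- import itertools
--
-- def make_hyper_string_from_dict(hyper_dict):
--     # Check all values are iterable lists
--     def type_check(value):
--         if isinstance(value, (list, range)):
--             return list(value)
--         else:
--             return [value]
--
--     hyper_dict = {key: type_check(value) for key, value in hyper_dict.items()}
--
--     commands = []
--     for args in itertools.product(*hyper_dict.values()):
--         command = "".join(["{}={} ".format(k, v) for k, v in zip(hyper_dict.keys(), args)])
--         commands.append(command[:-1])
--
--     return commands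
-- ===== SOURCE B (Python) =====
-- def make_hyper_string_from_dict(hyper_dict):
--     partials = [""]
--     for key, values in hyper_dict.items():
--         if not isinstance(values, (list, range)):
--             values = [values]
--         partials = [p + "{}={} ".format(key, v) for p in partials for v in values]
--     return [c[:-1] for c in partials]
-- ===== Notes on version B (the rewrite author's own statement) =====
-- stated objective: alternative
-- what changed: B replaces itertools.product over full value tuples plus a per-tuple zip/join with a single fold that grows a list of partial command prefixes, appending one 'key=value ' fragment per dict entry.
import Mathlib
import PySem

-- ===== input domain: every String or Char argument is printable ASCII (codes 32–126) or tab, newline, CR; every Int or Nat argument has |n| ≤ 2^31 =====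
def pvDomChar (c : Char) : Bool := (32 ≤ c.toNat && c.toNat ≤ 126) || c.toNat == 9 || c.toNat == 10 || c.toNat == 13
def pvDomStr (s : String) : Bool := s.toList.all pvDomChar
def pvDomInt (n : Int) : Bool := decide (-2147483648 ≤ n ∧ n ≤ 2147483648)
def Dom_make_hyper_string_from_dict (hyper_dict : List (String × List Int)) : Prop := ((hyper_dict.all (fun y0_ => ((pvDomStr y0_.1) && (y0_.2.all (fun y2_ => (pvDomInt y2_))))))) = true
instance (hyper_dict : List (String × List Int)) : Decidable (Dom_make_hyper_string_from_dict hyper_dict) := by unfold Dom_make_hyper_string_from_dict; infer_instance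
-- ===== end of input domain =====

-- B builds the command list by folding over the dict entries, extending a list of
-- partial command prefixes, instead of enumerating full value tuples with
-- itertools.product and joining each tuple against the key list (objective: alternative).

-- ===== PORT A =====
-- itertools.product(*lists): first list outermost (last varies fastest)
def pvProduct : List (List Int) → List (List Int)
  | [] => [[]]
  | vs :: rest => vs.flatMap (fun v => (pvProduct rest).map (v :: ·))

-- "{}={} ".format(k, v)
def pvFmt (k : String) (v : Int) : String := k ++ "=" ++ PySem.Int.toStr v ++ " "

def make_hyper_string_from_dict (hyper_dict : List (String × List Int)) : List String :=
  -- {key: type_check(value) for key, value in hyper_dict.items()}; on this domain every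
  -- value is a list[int], so type_check(value) = list(value), an identical copy
  let d : PySem.Dict String (List Int) :=
    hyper_dict.foldl (fun d kv => d.insert kv.1 kv.2) PySem.Dict.empty
  (pvProduct d.values).map (fun args =>
    let command := PySem.Str.join "" ((d.keys.zip args).map (fun kv => pvFmt kv.1 kv.2))
    PySem.Str.slice command none (some (-1)))

-- ===== PORT B =====
def make_hyper_string_from_dict_alt (hyper_dict : List (String × List Int)) : List String :=
  (hyper_dict.foldl
      (fun partials kv =>
        partials.flatMap (fun p => kv.2.map (fun v => p ++ kv.1 ++ "=" ++ PySem.Int.toStr v ++ " ")))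
      [""]).map
    (fun c => PySem.Str.slice c none (some (-1)))

-- ===== PRECONDITION & SPEC =====
-- Pre_ excludes association lists with duplicate keys: they do not represent a Python
-- dict (dict construction collapses duplicates, keeping only the last value).
def Pre_make_hyper_string_from_dict (hyper_dict : List (String × List Int)) : Prop :=
  (hyper_dict.map Prod.fst).Nodup
instance (hyper_dict : List (String × List Int)) : Decidable (Pre_make_hyper_string_from_dict hyper_dict) := by unfold Pre_make_hyper_string_from_dict; infer_instance
def pvWitness_make_hyper_string_from_dict : (List (String × List Int)) :=
  [("a", [1, 2]), ("b", [3])]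

def Spec_make_hyper_string_from_dict (hyper_dict : List (String × List Int)) (out : List String) : Prop := out = make_hyper_string_from_dict_alt hyper_dict
instance (hyper_dict : List (String × List Int)) (out : List String) : Decidable (Spec_make_hyper_string_from_dict hyper_dict out) := by unfold Spec_make_hyper_string_from_dict; infer_instance

-- ===== CLAIM (what is proved, stated in full; the proofs are below) =====
def Claim_equal_make_hyper_string_from_dict : Prop := ∀ (hyper_dict : List (String × List Int)), Dom_make_hyper_string_from_dict hyper_dict → Pre_make_hyper_string_from_dict hyper_dict → Spec_make_hyper_string_from_dict hyper_dict (make_hyper_string_from_dict hyper_dict)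

-- ===== LEMMAS AND PROOFS =====

-- With distinct keys, rebuilding the dict from the association list is the identity.
theorem pv_items_fold (hd : List (String × List Int))
    (h : (hd.map Prod.fst).Nodup) :
    (hd.foldl (fun d kv => d.insert kv.1 kv.2)
      (PySem.Dict.empty : PySem.Dict String (List Int))).items = hd := by
  have := PySem.Dict.items_foldl_insert_fresh (l := hd) (k := Prod.fst) (v := Prod.snd)
    (d := (PySem.Dict.empty : PySem.Dict String (List Int)))
    (by intro a _; simp [PySem.Dict.contains_empty]) h
  simpa using this

-- join with "" concatenates
theorem pv_join_empty_cons (a : String) (l : List String) :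
    PySem.Str.join "" (a :: l) = a ++ PySem.Str.join "" l := by
  apply String.ext
  simp [PySem.Str.toList_join]
  cases l with
  | nil => simp [PySem.Chars.join_singleton, PySem.Chars.join_nil]
  | cons b t => simp [PySem.Chars.join_cons_cons]

-- the fold of B, characterised against pvProduct
theorem pv_fold_eq (hd : List (String × List Int)) (partials : List String) :
    hd.foldl
      (fun partials kv =>
        partials.flatMap (fun p => kv.2.map (fun v => p ++ kv.1 ++ "=" ++ PySem.Int.toStr v ++ " ")))
      partials
    = partials.flatMap (fun p =>
        (pvProduct (hd.map Prod.snd)).map (fun args =>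
          p ++ PySem.Str.join "" (((hd.map Prod.fst).zip args).map (fun kv => pvFmt kv.1 kv.2)))) := by
  induction hd generalizing partials with
  | nil =>
      have h0 : PySem.Str.join "" ([] : List String) = "" := rfl
      simp [pvProduct, h0]
  | cons kv rest ih =>
      simp only [List.foldl_cons, ih, pvProduct, List.map_cons]
      rw [List.flatMap_assoc]
      congr 1
      funext p
      rw [List.map_flatMap, List.flatMap_map]
      congr 1
      funext v
      rw [List.map_map]
      congr 1
      funext args
      simp only [Function.comp, List.zip_cons_cons, List.map_cons, pv_join_empty_cons, pvFmt]
      simp [String.append_assoc]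

theorem make_hyper_string_from_dict_spec : Claim_equal_make_hyper_string_from_dict := by
  intro hd _ hpre
  unfold Spec_make_hyper_string_from_dict
  unfold make_hyper_string_from_dict make_hyper_string_from_dict_alt
  have hitems := pv_items_fold hd hpre
  have hkeys : (hd.foldl (fun d kv => d.insert kv.1 kv.2)
      (PySem.Dict.empty : PySem.Dict String (List Int))).keys = hd.map Prod.fst := by
    simp [PySem.Dict.keys, hitems]
  have hvals : (hd.foldl (fun d kv => d.insert kv.1 kv.2)
      (PySem.Dict.empty : PySem.Dict String (List Int))).values = hd.map Prod.snd := by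
    simp [PySem.Dict.values, hitems]
  rw [pv_fold_eq]
  simp only [hkeys, hvals]
  simp [List.flatMap]
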